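-- pv_equiv track=rewrite | github.com/seminss/algorithm-study | khw3754/PGS/[PGS] 할인 행사.py | solution
-- ===== SOURCE A (Python) =====
-- def solution(want, number, discount):
--     answer = 0
--
--     want_dict = {w: n for w, n in zip(want, number)}
--
--     # 1일차부터 10일 단위로 확인
--     for i in range(len(discount) - 9):
--         wants = want_dict.copy()
--         # 현재 일차부터 10일간 물품 확인
--         for dis in discount[i:i + 10]:
--             if wants.get(dis, -1) != -1:
--                 wants[dis] -= 1
--         # 만약 모두 살 수 있다면 answer+1
--         for val in wants.values():
--             if val > 0:
--                 break
--         else: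
--             answer += 1
--
--     return answer
-- ===== SOURCE B (Python) =====
-- def solution(want, number, discount):
--     # Sliding 10-day window: maintain per-item window counts and a counter of
--     # still-unsatisfied wanted items, updated incrementally in one pass.
--     need = dict(zip(want, number))
--     cnt = dict.fromkeys(need, 0)
--     short = sum(1 for n in need.values() if n > 0)
--     answer = 0
--     for j, item in enumerate(discount):
--         if item in cnt:
--             cnt[item] += 1
--             if cnt[item] == need[item]:
--                 short -= 1
--         if j >= 10:
--             old = discount[j - 10]
--             if old in cnt:
--                 if cnt[old] == need[old]:
--                     short += 1
--                 cnt[old] -= 1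
--         if j >= 9 and short == 0:
--             answer += 1
--     return answer
-- ===== Notes on version B (the rewrite author's own statement) =====
-- stated objective: faster
-- what changed: Replaces the per-day dict copy + 10-element decrement scan with a single sliding-window pass that maintains per-item window counts and an unsatisfied-item counter incrementally.
import Mathlib
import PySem

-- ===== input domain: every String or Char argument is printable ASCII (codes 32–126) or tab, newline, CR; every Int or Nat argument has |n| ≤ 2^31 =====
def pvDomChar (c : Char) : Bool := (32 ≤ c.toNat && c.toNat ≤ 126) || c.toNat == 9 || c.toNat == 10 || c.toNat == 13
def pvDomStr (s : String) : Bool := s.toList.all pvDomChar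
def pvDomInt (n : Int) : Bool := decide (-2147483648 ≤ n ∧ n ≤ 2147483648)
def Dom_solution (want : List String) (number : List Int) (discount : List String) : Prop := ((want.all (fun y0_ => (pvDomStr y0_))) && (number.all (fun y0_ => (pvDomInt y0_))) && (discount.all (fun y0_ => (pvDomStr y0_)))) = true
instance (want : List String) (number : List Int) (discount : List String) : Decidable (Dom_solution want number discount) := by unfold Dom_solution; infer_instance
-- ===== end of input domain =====

-- B replaces A's per-day dict copy + decrement scan by one sliding-window pass that keeps
-- per-item window counts and a counter of still-unsatisfied items, updated incrementally (faster).

-- ===== PORT A =====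
-- inner loop body of A: 'if wants.get(dis, -1) != -1: wants[dis] -= 1'
def aStep (w : PySem.Dict String Int) (dis : String) : PySem.Dict String Int :=
  if w.getD dis (-1) ≠ -1 then w.insert dis (w.getD dis (-1) - 1) else w

def solution (want : List String) (number : List Int) (discount : List String) : Int :=
  let want_dict := (want.zip number).foldl (fun d p => d.insert p.1 p.2) PySem.Dict.empty
  (PySem.List.pyRange 0 ((discount.length : Int) - 9) 1).foldl
    (fun answer i =>
      let wants := (PySem.List.slice discount (some i) (some (i + 10))).foldl aStep want_dict
      -- 'for val in wants.values(): if val > 0: break / else: answer += 1'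
      if wants.values.any (fun v => decide (0 < v)) then answer else answer + 1)
    0

-- ===== PORT B =====
-- loop body of B: add today's item to the window counts, drop the item that left the
-- window, keep 'short' = number of wanted items whose window count is below its need
def altStep (need : PySem.Dict String Int) (discount : List String)
    (st : PySem.Dict String Int × Int × Int) (ji : Int × String) :
    PySem.Dict String Int × Int × Int :=
  let cnt := st.1
  let short := st.2.1
  let answer := st.2.2
  let j := ji.1
  let item := ji.2
  let cnt1 := if cnt.contains item then cnt.modify item 0 (· + 1) else cnt
  let short1 := if cnt.contains item then
      (if cnt1.getD item 0 == need.getD item 0 then short - 1 else short) else short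
  let old := PySem.List.pyGetD discount (j - 10) ""
  let short2 := if 10 ≤ j ∧ cnt1.contains old then
      (if cnt1.getD old 0 == need.getD old 0 then short1 + 1 else short1) else short1
  let cnt2 := if 10 ≤ j ∧ cnt1.contains old then cnt1.modify old 0 (· - 1) else cnt1
  let answer1 := if 9 ≤ j ∧ short2 = 0 then answer + 1 else answer
  (cnt2, short2, answer1)

def solution_alt (want : List String) (number : List Int) (discount : List String) : Int :=
  let need := (want.zip number).foldl (fun d p => d.insert p.1 p.2) PySem.Dict.empty
  let cnt := need.keys.foldl (fun d k => d.insert k (0 : Int)) PySem.Dict.empty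
  let short : Int := (need.values.countP (fun n => decide (0 < n)) : Int)
  ((PySem.List.enumerate discount 0).foldl (altStep need discount) (cnt, short, 0)).2.2

-- ===== PRECONDITION & SPEC =====
def Spec_solution (want : List String) (number : List Int) (discount : List String) (out : Int) : Prop := out = solution_alt want number discount
instance (want : List String) (number : List Int) (discount : List String) (out : Int) : Decidable (Spec_solution want number discount out) := by unfold Spec_solution; infer_instance

-- ===== CLAIM (what is proved, stated in full; the proofs are below) =====
def Claim_equal_solution : Prop := ∀ (want : List String) (number : List Int) (discount : List String), Dom_solution want number discount → Spec_solution want number discount (solution want number discount)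

-- ===== LEMMAS AND PROOFS =====

-- the wanted-items dict both programs build
def mkNeed (want : List String) (number : List Int) : PySem.Dict String Int :=
  (want.zip number).foldl (fun d p => d.insert p.1 p.2) PySem.Dict.empty

-- count of item k in the 10-day window ending just before day t
def wcount (discount : List String) (t : Nat) (k : String) : Nat :=
  ((discount.take t).drop (t - 10)).count k

-- "item k is still short in the window ending before day t"
def predB (D : PySem.Dict String Int) (discount : List String) (t : Nat) (k : String) : Bool :=
  decide ((wcount discount t k : Int) < D.getD k 0)

-- "the window ending before day t satisfies every wanted item"
def okT (D : PySem.Dict String Int) (discount : List String) (t : Nat) : Bool :=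
  D.keys.all (fun k => ! predB D discount t k)

-- value of one dict entry after A's inner loop hits it c times
def decseq (v : Int) : Nat → Int
  | 0 => v
  | c + 1 => decseq (if v ≠ -1 then v - 1 else v) c

lemma mkNeed_nodup (want : List String) (number : List Int) : (mkNeed want number).keys.Nodup := by
  exact PySem.Dict.nodup_keys_foldl_insert_key (want.zip number) Prod.fst
    (fun _ p => p.2) (PySem.Dict.empty : PySem.Dict String Int)
    (by rw [PySem.Dict.keys_empty]; exact List.nodup_nil)

lemma getD_default_irrel (d : PySem.Dict String Int) (k : String) (h : k ∈ d.keys) (a b : Int) :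
    d.getD k a = d.getD k b := by
  cases hv : d.get? k with
  | none => exact absurd h ((PySem.Dict.get?_eq_none_iff_not_mem_keys d k).1 hv)
  | some v => rw [PySem.Dict.getD_eq_get?_getD, PySem.Dict.getD_eq_get?_getD, hv]; rfl

lemma decseq_le (c : Nat) : ∀ v : Int, (decseq v c ≤ 0 ↔ v ≤ (c : Int)) := by
  induction c with
  | zero => intro v; simp [decseq]
  | succ c ih =>
    intro v
    rw [decseq, ih]
    by_cases hv : v = -1
    · simp [hv]
      omega
    · simp [hv]

lemma foldA_getD (ds : List String) : ∀ (w : PySem.Dict String Int) (k : String),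
    (ds.foldl aStep w).getD k (-1) = decseq (w.getD k (-1)) (ds.count k) := by
  induction ds with
  | nil => intro w k; simp [decseq]
  | cons dis rest ih =>
    intro w k
    rw [List.foldl_cons, ih]
    by_cases hk : dis = k
    · subst hk
      rw [List.count_cons_self]
      simp only [decseq]
      congr 1
      unfold aStep
      split_ifs with h
      · rw [PySem.Dict.getD_insert]
        simp
      · rfl
    · rw [List.count_cons_of_ne hk]
      congr 1
      unfold aStep
      split_ifs with h
      · rw [PySem.Dict.getD_insert, if_neg (fun hkd : k = dis => hk hkd.symm)]
      · rfl

lemma foldA_keys (ds : List String) : ∀ (w : PySem.Dict String Int),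
    (ds.foldl aStep w).keys = w.keys := by
  induction ds with
  | nil => intro w; rfl
  | cons dis rest ih =>
    intro w
    rw [List.foldl_cons, ih]
    unfold aStep
    split_ifs with h
    · apply PySem.Dict.keys_insert_of_contains
      by_contra hc
      exact h (PySem.Dict.getD_of_not_contains w (-1) (by simpa using hc))
    · rfl

lemma countP_change {α : Type} (K : List α) (hnd : K.Nodup) (p q : α → Bool) (a : α)
    (ha : a ∈ K) (h : ∀ b ∈ K, b ≠ a → q b = p b) :
    (K.countP q : Int) = (K.countP p : Int)
      + (if q a then 1 else 0) - (if p a then 1 else 0) := by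
  induction K with
  | nil => cases ha
  | cons x xs ih =>
    rw [List.nodup_cons] at hnd
    rw [List.countP_cons, List.countP_cons]
    rcases List.mem_cons.1 ha with rfl | hax
    · have : xs.countP q = xs.countP p := by
        apply List.countP_congr
        intro b hb
        rw [h b (List.mem_cons_of_mem _ hb) (fun hba => hnd.1 (hba ▸ hb))]
      rw [this]
      split_ifs <;> omega
    · have hxq : q x = p x := h x List.mem_cons_self
        (fun hxa => hnd.1 (hxa ▸ hax))
      have := ih hnd.2 hax (fun b hb hba => h b (List.mem_cons_of_mem _ hb) hba)
      rw [hxq]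
      push_cast at this ⊢
      rw [this]
      split_ifs <;> omega

lemma wcount_succ_lt (discount : List String) (t : Nat) (ht : t < discount.length)
    (hlt : t < 10) (k : String) :
    wcount discount (t + 1) k
      = wcount discount t k + (if discount[t] = k then 1 else 0) := by
  unfold wcount
  have h1 : t + 1 - 10 = 0 := by omega
  have h2 : t - 10 = 0 := by omega
  rw [h1, h2, List.drop_zero, List.drop_zero, List.take_succ_eq_append_getElem ht,
    List.count_append]
  simp [List.count_cons]

lemma wcount_succ_ge (discount : List String) (t : Nat) (ht : t < discount.length)
    (hge : 10 ≤ t) (k : String) :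
    wcount discount (t + 1) k + (if discount[t - 10]'(by omega) = k then 1 else 0)
      = wcount discount t k + (if discount[t]'ht = k then 1 else 0) := by
  unfold wcount
  have hlen : (discount.take t).length = t := List.length_take_of_le (by omega)
  have h1 : t + 1 - 10 = t - 9 := by omega
  have hd : (discount.take t).drop (t - 10)
      = discount[t - 10]'(by omega) :: (discount.take t).drop (t - 9) := by
    rw [List.drop_eq_getElem_cons (by omega : t - 10 < (discount.take t).length)]
    congr 1
    · exact List.getElem_take
    · congr 1; omega
  rw [List.take_succ_eq_append_getElem ht, h1,
    List.drop_append_of_le_length (by omega), hd, List.count_append, List.count_cons]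
  simp [List.count_cons]
  split_ifs <;> simp_all

lemma phaseAdd (D : PySem.Dict String Int) (hnd : D.keys.Nodup)
    (c : String → Int) (x : String) (cnt : PySem.Dict String Int)
    (hkeys : cnt.keys = D.keys) (hc : ∀ k ∈ D.keys, cnt.getD k 0 = c k)
    (short : Int) (hshort : short = (D.keys.countP (fun k => decide (c k < D.getD k 0)) : Int)) :
    (if cnt.contains x then cnt.modify x 0 (· + 1) else cnt).keys = D.keys
    ∧ (∀ k ∈ D.keys, (if cnt.contains x then cnt.modify x 0 (· + 1) else cnt).getD k 0
        = c k + (if x = k then 1 else 0))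
    ∧ (if cnt.contains x then
          (if (if cnt.contains x then cnt.modify x 0 (· + 1) else cnt).getD x 0 == D.getD x 0
            then short - 1 else short) else short)
        = (D.keys.countP (fun k => decide (c k + (if x = k then 1 else 0) < D.getD k 0)) : Int) := by
  by_cases hx : cnt.contains x
  · have hxK : x ∈ D.keys := by rw [← hkeys]; exact (PySem.Dict.contains_iff_mem_keys cnt x).1 hx
    rw [if_pos hx]
    have hk1 : (cnt.modify x 0 (· + 1)).keys = D.keys := by
      rw [PySem.Dict.keys_modify, PySem.Dict.keys_insert_of_contains cnt _ hx, hkeys]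
    have hg1 : ∀ k ∈ D.keys, (cnt.modify x 0 (· + 1)).getD k 0 = c k + (if x = k then 1 else 0) := by
      intro k hk
      rw [PySem.Dict.getD_modify]
      by_cases hkx : k = x
      · subst hkx
        rw [if_pos rfl, if_pos rfl, hc k hk]
      · rw [if_neg hkx, if_neg (fun h : x = k => hkx h.symm), hc k hk]
        omega
    refine ⟨hk1, hg1, ?_⟩
    rw [countP_change D.keys hnd (fun k => decide (c k < D.getD k 0))
      (fun k => decide (c k + (if x = k then 1 else 0) < D.getD k 0)) x hxK
      (by
        intro b hb hbx
        have hxb : (x = b) = False := eq_false (fun h => hbx h.symm)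
        simp [hxb])]
    rw [hg1 x hxK, ← hshort]
    simp only [beq_iff_eq, decide_eq_true_eq, if_true]
    split_ifs <;> omega
  · have hxK : x ∉ D.keys := by
      rw [← hkeys]
      exact fun hmem => hx ((PySem.Dict.contains_iff_mem_keys cnt x).2 hmem)
    have hxf : cnt.contains x = false := by simpa using hx
    simp only [hxf, Bool.false_eq_true, if_false]
    refine ⟨hkeys, ?_, ?_⟩
    · intro k hk
      rw [if_neg (fun h : x = k => hxK (h ▸ hk)), hc k hk]
      omega
    · rw [hshort]
      congr 1
      apply List.countP_congr
      intro k hk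
      rw [if_neg (fun h : x = k => hxK (h ▸ hk))]
      simp
lemma phaseSub (D : PySem.Dict String Int) (hnd : D.keys.Nodup)
    (c w : String → Int) (old : String) (cnt1 : PySem.Dict String Int)
    (hkeys : cnt1.keys = D.keys) (hc : ∀ k ∈ D.keys, cnt1.getD k 0 = c k)
    (hrel : ∀ k ∈ D.keys, w k = c k - (if old = k then 1 else 0))
    (short1 : Int)
    (hs1 : short1 = (D.keys.countP (fun k => decide (c k < D.getD k 0)) : Int)) :
    (if cnt1.contains old then cnt1.modify old 0 (· - 1) else cnt1).keys = D.keys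
    ∧ (∀ k ∈ D.keys, (if cnt1.contains old then cnt1.modify old 0 (· - 1) else cnt1).getD k 0 = w k)
    ∧ (if cnt1.contains old then
          (if cnt1.getD old 0 == D.getD old 0 then short1 + 1 else short1) else short1)
        = (D.keys.countP (fun k => decide (w k < D.getD k 0)) : Int) := by
  by_cases hx : cnt1.contains old
  · have hxK : old ∈ D.keys := by
      rw [← hkeys]; exact (PySem.Dict.contains_iff_mem_keys cnt1 old).1 hx
    rw [if_pos hx]
    refine ⟨?_, ?_, ?_⟩
    · rw [PySem.Dict.keys_modify, PySem.Dict.keys_insert_of_contains cnt1 _ hx, hkeys]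
    · intro k hk
      rw [PySem.Dict.getD_modify, hrel k hk]
      by_cases hkx : k = old
      · subst hkx
        rw [if_pos rfl, if_pos rfl, hc k hk]
      · rw [if_neg hkx, if_neg (fun h : old = k => hkx h.symm), hc k hk]
        omega
    · rw [countP_change D.keys hnd (fun k => decide (c k < D.getD k 0))
        (fun k => decide (w k < D.getD k 0)) old hxK
        (by
          intro b hb hbx
          have hxb : (old = b) = False := eq_false (fun h => hbx h.symm)
          simp [hrel b hb, hxb])]
      rw [hrel old hxK, hc old hxK, ← hs1]
      simp only [beq_iff_eq, decide_eq_true_eq, if_true]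
      split_ifs <;> omega
  · have hxK : old ∉ D.keys := by
      rw [← hkeys]
      exact fun hmem => hx ((PySem.Dict.contains_iff_mem_keys cnt1 old).2 hmem)
    have hxf : cnt1.contains old = false := by simpa using hx
    simp only [hxf, Bool.false_eq_true, if_false]
    refine ⟨hkeys, ?_, ?_⟩
    · intro k hk
      rw [hrel k hk, if_neg (fun h : old = k => hxK (h ▸ hk)), hc k hk]
      omega
    · rw [hs1]
      congr 1
      apply List.countP_congr
      intro k hk
      rw [hrel k hk, if_neg (fun h : old = k => hxK (h ▸ hk))]
      simp

lemma getD_zero_fold (l : List String) : ∀ (d : PySem.Dict String Int) (k : String),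
    d.getD k 0 = 0 → (l.foldl (fun d k => d.insert k (0 : Int)) d).getD k 0 = 0 := by
  induction l with
  | nil => intro d k h; exact h
  | cons a l ih =>
    intro d k h
    rw [List.foldl_cons]
    apply ih
    rw [PySem.Dict.getD_insert]
    split_ifs <;> simp [h]

lemma finish_step (D : PySem.Dict String Int) (discount : List String) (t : Nat)
    (ht : t < discount.length) (S : Int)
    (hS : S = (D.keys.countP (predB D discount (t + 1)) : Int)) (ans : Int) :
    (if 9 ≤ (t : Int) ∧ S = 0 then ans + 1 else ans)
      + ((List.range' (t + 1) (discount.length - (t + 1))).countP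
          (fun j => decide (9 ≤ j) && okT D discount (j + 1)) : Int)
      = ans + ((List.range' t (discount.length - t)).countP
          (fun j => decide (9 ≤ j) && okT D discount (j + 1)) : Int) := by
  have hsplit : discount.length - t = (discount.length - (t + 1)) + 1 := by omega
  rw [hsplit, List.range'_succ, List.countP_cons]
  have hokiff : (S = 0) ↔ (okT D discount (t + 1) = true) := by
    rw [hS, okT, List.all_eq_true]
    constructor
    · intro h k hk
      have h0 : D.keys.countP (predB D discount (t + 1)) = 0 := by exact_mod_cast h
      have := List.countP_eq_zero.1 h0 k hk
      simp [this]
    · intro h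
      have h0 : D.keys.countP (predB D discount (t + 1)) = 0 :=
        List.countP_eq_zero.2 (fun k hk => by
          have := h k hk
          simpa using this)
      rw [h0]
      rfl
  by_cases h9 : 9 ≤ t
  · have h9' : (9 ≤ (t : Int)) := by exact_mod_cast h9
    by_cases hz : S = 0
    · rw [if_pos ⟨h9', hz⟩]
      have hb : (decide (9 ≤ t) && okT D discount (t + 1)) = true := by
        simp [h9, hokiff.1 hz]
      rw [hb]
      simp
      omega
    · rw [if_neg (fun h => hz h.2)]
      have hb : (decide (9 ≤ t) && okT D discount (t + 1)) = false := by
        cases hok : okT D discount (t + 1)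
        · simp
        · exact absurd (hokiff.2 hok) hz
      rw [hb]
      simp
  · have hb : (decide (9 ≤ t) && okT D discount (t + 1)) = false := by simp [h9]
    rw [hb]
    rw [if_neg (fun hh => h9 (by exact_mod_cast hh.1))]
    simp

lemma B_inv (D : PySem.Dict String Int) (discount : List String) (hnd : D.keys.Nodup) :
    ∀ (rest : List String) (t : Nat) (cnt : PySem.Dict String Int) (short ans : Int),
      discount.drop t = rest →
      cnt.keys = D.keys →
      (∀ k ∈ D.keys, cnt.getD k 0 = (wcount discount t k : Int)) →
      short = (D.keys.countP (predB D discount t) : Int) →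
      ((PySem.List.enumerate rest (t : Int)).foldl (altStep D discount) (cnt, short, ans)).2.2
        = ans + ((List.range' t (discount.length - t)).countP
            (fun j => decide (9 ≤ j) && okT D discount (j + 1)) : Int) := by
  intro rest
  induction rest with
  | nil =>
    intro t cnt short ans hdrop hkeys hcnt hshort
    have hlen : discount.length ≤ t := List.drop_eq_nil_iff.1 hdrop
    rw [show discount.length - t = 0 from by omega]
    simp [PySem.List.enumerate_nil]
  | cons x rest ih =>
    intro t cnt short ans hdrop hkeys hcnt hshort
    have hne : discount.drop t ≠ [] := by rw [hdrop]; simp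
    have ht : t < discount.length := by
      by_contra hge
      exact hne (List.drop_eq_nil_iff.2 (by omega))
    have hcons := List.drop_eq_getElem_cons ht
    rw [hdrop] at hcons
    injection hcons with hx hrest
    subst hx
    rw [PySem.List.enumerate_cons, List.foldl_cons]
    simp only [altStep]
    subst hshort
    by_cases h10 : 10 ≤ t
    · have h10' : (10 ≤ (t : Int)) = True := eq_true (by exact_mod_cast h10)
      simp only [h10', true_and]
      have hold : PySem.List.pyGetD discount ((t : Int) - 10) ""
          = discount[t - 10]'(by omega) := by
        rw [PySem.List.pyGetD_eq_getElem discount "" (by omega) (by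
          have : t < discount.length := ht
          omega)]
        exact getElem_congr rfl (by omega) (by omega)
      rw [hold]
      obtain ⟨hkeys1, hcnt1, hshort1⟩ := phaseAdd D hnd
        (fun k => (wcount discount t k : Int)) (discount[t]'ht) cnt hkeys hcnt
        ((D.keys.countP (predB D discount t) : Int)) (by rfl)
      have hrel : ∀ k ∈ D.keys, ((wcount discount (t + 1) k : Int))
          = ((wcount discount t k : Int) + (if discount[t]'ht = k then 1 else 0))
            - (if discount[t - 10]'(by omega) = k then 1 else 0) := by
        intro k _
        have h := wcount_succ_ge discount t ht h10 k
        by_cases h1 : discount[t - 10]'(by omega) = k <;>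
          by_cases h2 : discount[t]'ht = k <;>
          simp [h1, h2] at h ⊢ <;> omega
      obtain ⟨hkeys2, hcnt2, hshort2⟩ := phaseSub D hnd
        (fun k => (wcount discount t k : Int) + (if discount[t]'ht = k then 1 else 0))
        (fun k => (wcount discount (t + 1) k : Int)) (discount[t - 10]'(by omega))
        _ hkeys1 hcnt1 hrel _ hshort1
      rw [show ((t : Int) + 1) = (((t + 1 : Nat)) : Int) from by push_cast; ring]
      rw [ih (t + 1) _ _ _ hrest.symm hkeys2 hcnt2 hshort2]
      exact finish_step D discount t ht _ hshort2 ans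
    · have h10f : ((10 : Int) ≤ (t : Int)) = False := eq_false (by
        intro hc
        exact h10 (by exact_mod_cast hc))
      simp only [h10f, false_and, if_false]
      obtain ⟨hkeys1, hcnt1, hshort1⟩ := phaseAdd D hnd
        (fun k => (wcount discount t k : Int)) (discount[t]'ht) cnt hkeys hcnt
        ((D.keys.countP (predB D discount t) : Int)) (by rfl)
      have hwInt : ∀ k, ((wcount discount (t + 1) k : Int))
          = (wcount discount t k : Int) + (if discount[t]'ht = k then 1 else 0) := by
        intro k
        rw [wcount_succ_lt discount t ht (by omega) k]
        by_cases hdk : discount[t]'ht = k <;> simp [hdk]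
      have hcnt' : ∀ k ∈ D.keys,
          (if cnt.contains (discount[t]'ht) then cnt.modify (discount[t]'ht) 0 (· + 1) else cnt).getD k 0
            = (wcount discount (t + 1) k : Int) := by
        intro k hk
        rw [hcnt1 k hk, ← hwInt k]
      have hshort' :
          (if cnt.contains (discount[t]'ht) then
            (if (if cnt.contains (discount[t]'ht) then cnt.modify (discount[t]'ht) 0 (· + 1) else cnt).getD (discount[t]'ht) 0
                == D.getD (discount[t]'ht) 0
              then (D.keys.countP (predB D discount t) : Int) - 1
              else (D.keys.countP (predB D discount t) : Int))
            else (D.keys.countP (predB D discount t) : Int))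
          = (D.keys.countP (predB D discount (t + 1)) : Int) := by
        rw [hshort1]
        congr 1
        apply List.countP_congr
        intro k hk
        unfold predB
        rw [hwInt k]
      rw [show ((t : Int) + 1) = (((t + 1 : Nat)) : Int) from by push_cast; ring]
      rw [ih (t + 1) _ _ _ hrest.symm hkeys1 hcnt' hshort']
      exact finish_step D discount t ht _ hshort' ans

lemma count_shift (N : Nat) (ok : Nat → Bool) :
    (List.range' 0 N).countP (fun j => decide (9 ≤ j) && ok (j + 1))
      = (List.range (N - 9)).countP (fun i => ok (i + 10)) := by
  by_cases hN : N ≤ 9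
  · have h9 : N - 9 = 0 := by omega
    rw [h9]
    simp only [List.range_zero, List.countP_nil]
    apply List.countP_eq_zero.2
    intro j hj
    have := (List.mem_range'_1.1 hj).2
    simp only [Bool.and_eq_true, decide_eq_true_eq]
    rintro ⟨h9j, -⟩
    omega
  · have hsplit : List.range' 0 N = List.range' 0 9 ++ List.range' 9 (N - 9) := by
      rw [List.range'_append_1]
      congr 1
      omega
    rw [hsplit, List.countP_append]
    have hz : (List.range' 0 9).countP (fun j => decide (9 ≤ j) && ok (j + 1)) = 0 := by
      apply List.countP_eq_zero.2
      intro j hj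
      have := (List.mem_range'_1.1 hj).2
      simp only [Bool.and_eq_true, decide_eq_true_eq]
      rintro ⟨h9j, -⟩
      omega
    rw [hz, Nat.zero_add, List.range'_eq_map_range, List.countP_map]
    apply List.countP_congr
    intro i hi
    simp only [Function.comp]
    constructor
    · rintro h
      simp only [Bool.and_eq_true] at h
      have : 9 + i + 1 = i + 10 := by omega
      rw [← this]
      exact h.2
    · intro h
      simp only [Bool.and_eq_true, decide_eq_true_eq]
      refine ⟨by omega, ?_⟩
      have : 9 + i + 1 = i + 10 := by omega
      rw [this]
      exact h

lemma if_flip (b : Bool) (x y : Int) : (if b then x else y) = if !b then y else x := by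
  cases b <;> simp

lemma pointwise_ok (D : PySem.Dict String Int) (discount : List String) (i : Nat) (k : String)
    (hk : k ∈ D.keys) :
    (!decide (0 < (((discount.drop i).take 10).foldl aStep D).getD k (-1)))
      = !predB D discount (i + 10) k := by
  rw [foldA_getD]
  have hv := getD_default_irrel D k hk (-1) 0
  have hc : ((discount.drop i).take 10).count k = wcount discount (i + 10) k := by
    unfold wcount
    rw [List.drop_take]
    congr 2
    omega
  rw [hv, hc]
  unfold predB
  have h1 : (0 < decseq (D.getD k 0) (wcount discount (i + 10) k))
      ↔ ((wcount discount (i + 10) k : Int) < D.getD k 0) := by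
    rw [← not_le, ← not_le]
    exact not_congr (decseq_le _ _)
  simp [h1]

lemma A_eq_countP (want : List String) (number : List Int) (discount : List String) :
    solution want number discount
      = ((List.range (discount.length - 9)).countP
          (fun i => okT (mkNeed want number) discount (i + 10)) : Int) := by
  show (PySem.List.pyRange 0 ((discount.length : Int) - 9) 1).foldl _ 0 = _
  rw [show (want.zip number).foldl (fun d p => d.insert p.1 p.2) PySem.Dict.empty
    = mkNeed want number from rfl]
  rw [PySem.List.foldl_congr_mem _ _
    (fun answer (i : Int) =>
      if (!((PySem.List.slice discount (some i) (some (i + 10))).foldl aStep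
          (mkNeed want number)).values.any (fun v => decide (0 < v))) then answer + 1 else answer) 0
    (by
      intro acc x _
      exact if_flip _ _ _)]
  rw [PySem.List.foldl_if_add_one
    (fun i : Int => !((PySem.List.slice discount (some i) (some (i + 10))).foldl aStep
      (mkNeed want number)).values.any (fun v => decide (0 < v)))]
  rw [Int.zero_add]
  congr 1
  rw [PySem.List.pyRange_one, List.countP_map]
  have hN : (((discount.length : Int) - 9) - 0).toNat = discount.length - 9 := by omega
  rw [hN]
  apply List.countP_congr
  intro i hi
  have hnd : (mkNeed want number).keys.Nodup := mkNeed_nodup want number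
  have hwin : PySem.List.slice discount (some ((0 : Int) + (i : Nat))) (some ((0 : Int) + (i : Nat) + 10))
      = (discount.drop i).take 10 := by
    have h10 : ((0 : Int) + (i : Nat) + 10) = ((i : Nat) : Int) + ((10 : Nat) : Int) := by
      push_cast; omega
    have h0 : ((0 : Int) + (i : Nat)) = ((i : Nat) : Int) := by omega
    rw [h10, h0]
    exact PySem.List.slice_natCast_add discount i 10
  simp only [Function.comp_apply]
  rw [hwin]
  have hkeys := foldA_keys ((discount.drop i).take 10) (mkNeed want number)
  have hvals := PySem.Dict.values_eq_map_keys
    (((discount.drop i).take 10).foldl aStep (mkNeed want number))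
    (by rw [hkeys]; exact hnd) (-1)
  rw [hvals, List.any_map, hkeys, List.not_any_eq_all_not]
  show (List.all _ _) = true ↔ (okT (mkNeed want number) discount (i + 10)) = true
  unfold okT
  simp only [List.all_eq_true, Function.comp_apply]
  constructor
  · intro h k hk
    rw [← pointwise_ok (mkNeed want number) discount i k hk]
    exact h k hk
  · intro h k hk
    rw [pointwise_ok (mkNeed want number) discount i k hk]
    exact h k hk

lemma B_eq_countP (want : List String) (number : List Int) (discount : List String) :
    solution_alt want number discount
      = ((List.range' 0 discount.length).countP
          (fun j => decide (9 ≤ j) && okT (mkNeed want number) discount (j + 1)) : Int) := by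
  show ((PySem.List.enumerate discount 0).foldl
      (altStep ((want.zip number).foldl (fun d p => d.insert p.1 p.2) PySem.Dict.empty) discount)
      (((want.zip number).foldl (fun d p => d.insert p.1 p.2) PySem.Dict.empty).keys.foldl
          (fun d k => d.insert k (0 : Int)) PySem.Dict.empty,
        (((want.zip number).foldl (fun d p => d.insert p.1 p.2) PySem.Dict.empty).values.countP
          (fun n => decide (0 < n)) : Int),
        (0 : Int))).2.2 = _
  rw [show (want.zip number).foldl (fun d p => d.insert p.1 p.2) PySem.Dict.empty
    = mkNeed want number from rfl]
  have hnd : (mkNeed want number).keys.Nodup := mkNeed_nodup want number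
  have hkeys0 : ((mkNeed want number).keys.foldl
      (fun d k => d.insert k (0 : Int)) PySem.Dict.empty).keys = (mkNeed want number).keys := by
    rw [PySem.Dict.keys_foldl_insert, PySem.Dict.keys_empty, PySem.Set.update_nil_left,
      PySem.Set.ofList_eq_self_of_nodup _ hnd]
  have hcnt0 : ∀ k ∈ (mkNeed want number).keys,
      ((mkNeed want number).keys.foldl (fun d k => d.insert k (0 : Int)) PySem.Dict.empty).getD k 0
        = (wcount discount 0 k : Int) := by
    intro k _
    rw [getD_zero_fold _ _ _ (PySem.Dict.getD_empty k 0)]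
    simp [wcount]
  have hshort0 : ((mkNeed want number).values.countP (fun n => decide (0 < n)) : Int)
      = ((mkNeed want number).keys.countP (predB (mkNeed want number) discount 0) : Int) := by
    rw [PySem.Dict.values_eq_map_keys _ hnd 0, List.countP_map]
    congr 1
  have h := B_inv (mkNeed want number) discount hnd discount 0
    ((mkNeed want number).keys.foldl (fun d k => d.insert k (0 : Int)) PySem.Dict.empty)
    ((mkNeed want number).keys.countP (predB (mkNeed want number) discount 0) : Int) 0
    (by simp) hkeys0 hcnt0 rfl
  rw [Nat.cast_zero] at h
  rw [hshort0, h, Nat.sub_zero, Int.zero_add]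

-- ===== VERDICT (by name: the statement is the Claim_ definition above) =====
theorem solution_spec : Claim_equal_solution := by
  intro want number discount _
  show _ = _
  rw [A_eq_countP, B_eq_countP, count_shift]
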